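-- pv_equiv track=rewrite | github.com/MuqrishSalihin/exampractice | 1870_algorithm_codes/compute_range.py | consecutive_num
-- ===== SOURCE A (Python) =====
-- def consecutive_num(s_a):
--     maximum = 1
--     current = 1
--
--     for i in range(len(s_a)-1):
--         if s_a[i+1] - s_a[i] == 1:
--             current+=1
--             maximum = max(current, maximum)
--         else:
--             current = 1
--
--     return maximum
-- ===== SOURCE B (Python) =====
-- def consecutive_num(s_a):
--     # Break-position formulation: the answer is the largest gap between
--     # consecutive "breaks" (positions where the +1 chain is interrupted),
--     # with sentinels at -1 and len(diffs).
--     diffs = [b - a == 1 for a, b in zip(s_a, s_a[1:])]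
--     breaks = [-1] + [i for i, d in enumerate(diffs) if not d] + [len(diffs)]
--     return max(b - a for a, b in zip(breaks, breaks[1:]))
-- ===== Notes on version B (the rewrite author's own statement) =====
-- stated objective: alternative
-- what changed: Replaces the fused running-counter/maximum scan with a break-position formulation: build the boolean +1-difference list, collect the indices where the chain breaks (with sentinels -1 and len), and return the maximum gap between consecutive break positions.
import Mathlib
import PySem

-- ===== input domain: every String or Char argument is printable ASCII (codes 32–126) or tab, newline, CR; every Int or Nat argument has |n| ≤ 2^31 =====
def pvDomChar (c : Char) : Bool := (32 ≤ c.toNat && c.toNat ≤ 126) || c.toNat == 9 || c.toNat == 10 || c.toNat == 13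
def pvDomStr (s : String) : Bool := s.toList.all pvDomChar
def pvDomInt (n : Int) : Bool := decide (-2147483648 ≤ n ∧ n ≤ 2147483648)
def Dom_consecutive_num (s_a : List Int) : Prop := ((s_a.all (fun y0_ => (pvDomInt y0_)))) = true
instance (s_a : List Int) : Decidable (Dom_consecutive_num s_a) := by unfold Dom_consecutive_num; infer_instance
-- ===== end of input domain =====

-- B computes the same longest-+1-run length via break positions and maximal gap (alternative decomposition, same cost).

-- ===== PORT A =====
-- indices i and i+1 are always in range inside the loop, so pyGetD's default is never used
def consecutive_num (s_a : List Int) : Int :=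
  (((PySem.List.pyRange 0 (PySem.List.len s_a - 1) 1).foldl
    (fun (st : Int × Int) (i : Int) =>
      if PySem.List.pyGetD s_a (i + 1) 0 - PySem.List.pyGetD s_a i 0 = 1 then
        (max (st.2 + 1) st.1, st.2 + 1)
      else (st.1, 1)) (1, 1))).1

-- ===== PORT B =====
-- diffs = [b - a == 1 for a, b in zip(s_a, s_a[1:])]
-- breaks = [-1] + [i for i, d in enumerate(diffs) if not d] + [len(diffs)]
-- return max(b - a for a, b in zip(breaks, breaks[1:]))  (breaks has ≥ 2 elements, so max?'s default is never used)
def pvDiffsB (s_a : List Int) : List Bool :=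
  (s_a.zip (PySem.List.slice s_a (some 1) none)).map (fun p => decide (p.2 - p.1 = 1))

def pvBreaksB (s_a : List Int) : List Int :=
  [-1] ++ ((PySem.List.enumerate (pvDiffsB s_a) 0).filter (fun p => !p.2)).map (fun p => p.1)
      ++ [PySem.List.len (pvDiffsB s_a)]

def consecutive_num_alt (s_a : List Int) : Int :=
  ((PySem.List.max?
      (((pvBreaksB s_a).zip (PySem.List.slice (pvBreaksB s_a) (some 1) none)).map
        (fun q => q.2 - q.1))
      (fun y => y)).getD 0)

-- ===== PRECONDITION & SPEC =====
def Spec_consecutive_num (s_a : List Int) (out : Int) : Prop := out = consecutive_num_alt s_a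
instance (s_a : List Int) (out : Int) : Decidable (Spec_consecutive_num s_a out) := by unfold Spec_consecutive_num; infer_instance

-- ===== CLAIM (what is proved, stated in full; the proofs are below) =====
def Claim_equal_consecutive_num : Prop := ∀ (s_a : List Int), Dom_consecutive_num s_a → Spec_consecutive_num s_a (consecutive_num s_a)

-- ===== LEMMAS AND PROOFS =====

-- boolean difference list both programs are (provably) functions of
def diffsOf (s_a : List Int) : List Bool :=
  (s_a.zip (s_a.drop 1)).map (fun p => decide (p.2 - p.1 = 1))

-- length of the maximal true-prefix
def leadT : List Bool → Int
  | [] => 0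
  | true :: ds => leadT ds + 1
  | false :: _ => 0

-- length of the maximal true-run anywhere
def maxRunT : List Bool → Int
  | [] => 0
  | d :: ds => max (leadT (d :: ds)) (maxRunT ds)

-- A's loop body, on the difference bit
def stepA (st : Int × Int) (d : Bool) : Int × Int :=
  if d then (max (st.2 + 1) st.1, st.2 + 1) else (st.1, 1)

-- max gap of prev :: bs ++ [e]
def gapsMax (prev : Int) : List Int → Int → Int
  | [], e => e - prev
  | b :: bs, e => max (b - prev) (gapsMax b bs e)

-- positions of the false entries
def posF : List Bool → List Int
  | [] => []
  | true :: ds => (posF ds).map (· + 1)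
  | false :: ds => 0 :: (posF ds).map (· + 1)

theorem leadT_nonneg (ds : List Bool) : 0 ≤ leadT ds := by
  induction ds with
  | nil => simp [leadT]
  | cons d ds ih =>
    cases d
    · simp [leadT]
    · simp [leadT]; omega

theorem leadT_le_maxRunT (ds : List Bool) : leadT ds ≤ maxRunT ds := by
  cases ds with
  | nil => simp [leadT, maxRunT]
  | cons d ds => simp [maxRunT]

theorem maxRunT_nonneg (ds : List Bool) : 0 ≤ maxRunT ds := by
  induction ds with
  | nil => simp [maxRunT]
  | cons d ds ih => simp [maxRunT]; omega

theorem foldA_eq (ds : List Bool) : ∀ (m c : Int), 1 ≤ c → c ≤ m →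
    (ds.foldl stepA (m, c)).1 = max m (max (c + leadT ds) (maxRunT ds + 1)) := by
  induction ds with
  | nil =>
    intro m c hc hm
    simp [leadT, maxRunT]
    omega
  | cons d ds ih =>
    intro m c hc hm
    cases d with
    | true =>
      have h := ih (max (c + 1) m) (c + 1) (by omega) (by omega)
      have h1 := leadT_nonneg ds
      have h2 := leadT_le_maxRunT ds
      have h3 := maxRunT_nonneg ds
      rw [List.foldl_cons, show stepA (m, c) true = (max (c + 1) m, c + 1) by simp [stepA]]
      rw [h]
      simp [leadT, maxRunT]
      omega
    | false =>
      have h := ih m 1 (by omega) (by omega)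
      have h1 := leadT_nonneg ds
      have h2 := leadT_le_maxRunT ds
      have h3 := maxRunT_nonneg ds
      rw [List.foldl_cons, show stepA (m, c) false = (m, 1) by simp [stepA]]
      rw [h]
      simp [leadT, maxRunT]
      omega

theorem gapsMax_shift (bs : List Int) : ∀ (prev e : Int),
    gapsMax prev (bs.map (· + 1)) (e + 1) = gapsMax (prev - 1) bs e := by
  induction bs with
  | nil => intro prev e; simp [gapsMax]; omega
  | cons b bs ih =>
    intro prev e
    simp only [List.map_cons, gapsMax]
    rw [ih]
    have hb : b + 1 - 1 = b := by ring
    rw [hb]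
    omega

theorem gapsMax_posF (ds : List Bool) : ∀ (k : Nat),
    gapsMax (-(1 + (k : Int))) (posF ds) (ds.length : Int) =
      max ((k : Int) + leadT ds + 1) (maxRunT ds + 1) := by
  induction ds with
  | nil => intro k; simp [posF, gapsMax, leadT, maxRunT]; omega
  | cons d ds ih =>
    intro k
    have h1 := leadT_nonneg ds
    have h2 := leadT_le_maxRunT ds
    have h3 := maxRunT_nonneg ds
    cases d with
    | true =>
      have hk : (-(1 + (k : Int)) - 1) = -(1 + ((k + 1 : Nat) : Int)) := by push_cast; ring
      have hs := gapsMax_shift (posF ds) (-(1 + (k : Int))) ((ds.length : Int))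
      rw [hk] at hs
      have h := ih (k + 1)
      simp only [posF, List.length_cons]
      push_cast
      rw [hs, h]
      simp only [leadT, maxRunT]
      push_cast
      omega
    | false =>
      have hs := gapsMax_shift (posF ds) 0 ((ds.length : Int))
      have h0 : (0 : Int) - 1 = -(1 + ((0 : Nat) : Int)) := by norm_num
      rw [h0] at hs
      have h := ih 0
      simp only [posF, List.length_cons, gapsMax]
      push_cast
      rw [hs, h]
      simp only [leadT, maxRunT]
      push_cast
      omega

-- gaps list of p :: bs ++ [e], folded with max
theorem foldl_max_gaps (bs : List Int) : ∀ (p e a : Int),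
    ((((p :: (bs ++ [e])).zip ((p :: (bs ++ [e])).drop 1)).map (fun q => q.2 - q.1)).foldl max a)
      = max a (gapsMax p bs e) := by
  induction bs with
  | nil => intro p e a; simp [gapsMax]
  | cons b bs ih =>
    intro p e a
    simp only [List.cons_append, List.drop_succ_cons, List.drop_zero, List.zip_cons_cons,
      List.map_cons, List.foldl_cons, gapsMax]
    have := ih b e (max a (b - p))
    simp only [List.drop_succ_cons, List.drop_zero] at this
    rw [this]
    omega

theorem maxgaps_eq (bs : List Int) (p e : Int) :
    (PySem.List.max?
      (((p :: (bs ++ [e])).zip ((p :: (bs ++ [e])).drop 1)).map (fun q => q.2 - q.1))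
      (fun y => y)).getD 0 = gapsMax p bs e := by
  cases bs with
  | nil =>
    simp [PySem.List.max?_id_cons, gapsMax]
  | cons b bs =>
    have hcons : (((p :: ((b :: bs) ++ [e])).zip ((p :: ((b :: bs) ++ [e])).drop 1)).map
        (fun q : Int × Int => q.2 - q.1))
        = (b - p) :: (((b :: (bs ++ [e])).zip ((b :: (bs ++ [e])).drop 1)).map (fun q => q.2 - q.1)) := by
      simp
    rw [hcons, PySem.List.max?_id_cons]
    have := foldl_max_gaps bs b e (b - p)
    rw [this]
    simp only [Option.getD_some, gapsMax]

-- enumerate/filter/map = posF (shifted by the start)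
theorem enum_filter_eq (ds : List Bool) : ∀ (s : Int),
    ((PySem.List.enumerate ds s).filter (fun p => !p.2)).map (fun p => p.1)
      = (posF ds).map (· + s) := by
  induction ds with
  | nil => intro s; simp [PySem.List.enumerate_nil, posF]
  | cons d ds ih =>
    intro s
    rw [PySem.List.enumerate_cons]
    cases d with
    | true =>
      rw [List.filter_cons_of_neg (by simp)]
      rw [ih (s + 1)]
      simp only [posF, List.map_map]
      apply List.map_congr_left
      intro x _
      simp only [Function.comp_apply]
      omega
    | false =>
      rw [List.filter_cons_of_pos (by simp)]
      simp only [List.map_cons]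
      rw [ih (s + 1)]
      simp only [posF, List.map_map, List.map_cons]
      refine List.cons_eq_cons.mpr ⟨by omega, ?_⟩
      apply List.map_congr_left
      intro x _
      simp only [Function.comp_apply]
      omega

-- the difference list, as indexed lookups (the form A's loop uses)
theorem diffsOf_eq_range (s_a : List Int) :
    diffsOf s_a = (List.range (s_a.length - 1)).map
      (fun i => decide (s_a.getD (i + 1) 0 - s_a.getD i 0 = 1)) := by
  apply List.ext_getElem
  · simp only [diffsOf, List.length_map, List.length_zip, List.length_drop, List.length_range]
    omega
  · intro i h1 h2
    simp only [diffsOf, List.getElem_map, List.getElem_zip, List.getElem_range, List.getElem_drop]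
    have hlen : i + 1 < s_a.length := by
      simp [diffsOf] at h1; omega
    simp only [show 1 + i = i + 1 from by omega]
    have e1 : s_a.getD (i + 1) 0 = s_a[i + 1]'(by omega) := List.getD_eq_getElem s_a 0 (by omega)
    have e2 : s_a.getD i 0 = s_a[i]'(by omega) := List.getD_eq_getElem s_a 0 (by omega)
    rw [e1, e2]

-- A's port, as a fold of stepA over the difference list
theorem portA_eq (s_a : List Int) :
    consecutive_num s_a = ((diffsOf s_a).foldl stepA (1, 1)).1 := by
  unfold consecutive_num
  have hrange : PySem.List.pyRange 0 (PySem.List.len s_a - 1) 1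
      = (List.range (s_a.length - 1)).map (fun k : Nat => (k : Int)) := by
    rcases s_a with _ | ⟨x, xs⟩
    · simp [PySem.List.pyRange, PySem.List.len]
    · have : PySem.List.len (x :: xs) - 1 = ((xs.length : Nat) : Int) := by
        simp [PySem.List.len_eq]
      rw [this, PySem.List.pyRange_zero_natCast]
      simp
  rw [hrange, List.foldl_map, diffsOf_eq_range, List.foldl_map]
  apply congrArg
  apply List.foldl_ext
  intro st i hi
  have hi' : i + 1 ≤ s_a.length - 1 := by
    simp at hi; omega
  have h1 : PySem.List.pyGetD s_a ((i : Int) + 1) 0 = s_a.getD (i + 1) 0 := by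
    rw [show ((i : Int) + 1) = ((i + 1 : Nat) : Int) by push_cast; ring,
      PySem.List.pyGetD_natCast]
  have h2 : PySem.List.pyGetD s_a (i : Int) 0 = s_a.getD i 0 := PySem.List.pyGetD_natCast ..
  rw [h1, h2]
  simp only [stepA]
  split <;> simp_all

-- B's port, as the max gap over the break positions of the difference list
theorem portB_eq (s_a : List Int) :
    consecutive_num_alt s_a = gapsMax (-1) (posF (diffsOf s_a)) ((diffsOf s_a).length : Int) := by
  have hd : pvDiffsB s_a = diffsOf s_a := by
    unfold pvDiffsB diffsOf
    rw [PySem.List.slice_from_one, ← List.drop_one]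
  have hb : pvBreaksB s_a
      = (-1) :: (posF (diffsOf s_a) ++ [((diffsOf s_a).length : Int)]) := by
    unfold pvBreaksB
    rw [hd, enum_filter_eq (diffsOf s_a) 0]
    simp [PySem.List.len_eq]
  unfold consecutive_num_alt
  rw [hb, PySem.List.slice_from_one]
  have h := maxgaps_eq (posF (diffsOf s_a)) (-1) ((diffsOf s_a).length : Int)
  simpa using h

-- ===== VERDICT (by name: the statement is the Claim_ definition above) =====
theorem consecutive_num_spec : Claim_equal_consecutive_num := by
  intro s_a _
  unfold Spec_consecutive_num
  rw [portA_eq, portB_eq]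
  set ds := diffsOf s_a with hds
  have hA := foldA_eq ds 1 1 (by omega) (by omega)
  have hB := gapsMax_posF ds 0
  have h1 := leadT_nonneg ds
  have h2 := leadT_le_maxRunT ds
  have h3 := maxRunT_nonneg ds
  rw [hA]
  simp only [Nat.cast_zero] at hB
  rw [show (-1 : Int) = -(1 + (0 : Int)) by ring, hB]
  omega
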